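-- pv_equiv track=rewrite | github.com/feiwhang/automated-clean-code | src/automated_clean_code/histlib.py | find_max_counter
-- ===== SOURCE A (Python) =====
-- def find_max_counter(counter: dict) -> tuple:
--     """Find max key and max counter.
--
--     Args:
--         counter (dict): counter histogram
--
--     Returns:
--         tuple: max key and max counter
--     """
--     max_key = None
--     max_counter = 0
--     for k, v in counter.items():
--         if max_key is None or v > max_counter:
--             max_key = k
--             max_counter = v
--     return max_key, max_counter
-- ===== SOURCE B (Python) =====
-- def find_max_counter(counter: dict) -> tuple:
--     """Find max key and max counter (two-pass: max of values, then locate first key)."""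
--     if not counter:
--         return (None, 0)
--     m = max(counter.values())
--     for k, v in counter.items():
--         if v == m:
--             return (k, v)
-- ===== Notes on version B (the rewrite author's own statement) =====
-- stated objective: alternative
-- what changed: Replaces A's single stateful argmax loop (running best key/count) by a stateless two-pass decomposition: compute the maximum of the values first, then return the first item attaining it, with an early return of A's sentinel on the empty dict.
import Mathlib
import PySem

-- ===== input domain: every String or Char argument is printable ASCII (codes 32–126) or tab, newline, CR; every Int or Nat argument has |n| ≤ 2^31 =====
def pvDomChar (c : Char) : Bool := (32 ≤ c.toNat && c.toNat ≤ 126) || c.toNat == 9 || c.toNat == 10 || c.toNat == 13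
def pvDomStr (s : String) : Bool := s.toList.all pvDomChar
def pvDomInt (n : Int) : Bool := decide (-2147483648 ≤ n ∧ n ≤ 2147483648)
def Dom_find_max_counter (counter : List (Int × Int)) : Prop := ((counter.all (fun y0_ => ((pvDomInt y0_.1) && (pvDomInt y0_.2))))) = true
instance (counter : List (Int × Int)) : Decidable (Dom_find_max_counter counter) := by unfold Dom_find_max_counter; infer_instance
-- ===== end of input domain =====

-- B replaces A's single stateful argmax loop by a stateless two-pass scan (max of values, then
-- first item attaining it); same O(n) cost, different decomposition (objective: alternative).

-- ===== PORT A =====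
def fmStep (st : Option Int × Int) (kv : Int × Int) : Option Int × Int :=
  if st.1 = none ∨ kv.2 > st.2 then (some kv.1, kv.2) else st

def find_max_counter (counter : List (Int × Int)) : Option Int × Int :=
  counter.foldl fmStep (none, 0)

-- ===== PORT B =====
def find_max_counter_alt (counter : List (Int × Int)) : Option Int × Int :=
  match counter with
  | [] => (none, 0)
  | x :: t =>
    match PySem.List.max? ((x :: t).map Prod.snd) (fun y => y) with
    | none => (none, 0)        -- unreachable: the list is nonempty
    | some m =>
      match (x :: t).find? (fun kv => kv.2 == m) with
      | some kv => (some kv.1, kv.2)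
      | none => (none, 0)      -- unreachable: m is attained by some item

-- ===== PRECONDITION & SPEC =====
def Spec_find_max_counter (counter : List (Int × Int)) (out : Option Int × Int) : Prop := out = find_max_counter_alt counter
instance (counter : List (Int × Int)) (out : Option Int × Int) : Decidable (Spec_find_max_counter counter out) := by unfold Spec_find_max_counter; infer_instance

-- ===== CLAIM (what is proved, stated in full; the proofs are below) =====
def Claim_equal_find_max_counter : Prop := ∀ (counter : List (Int × Int)), Dom_find_max_counter counter → Spec_find_max_counter counter (find_max_counter counter)

-- ===== LEMMAS AND PROOFS =====

-- Core invariant: folding A's step from state (some k, v) returns the first item of (k,v)::t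
-- whose value equals the running maximum of v and t's values.
theorem foldl_fmStep_eq (t : List (Int × Int)) (k v : Int) :
    t.foldl fmStep (some k, v) =
      (match ((k, v) :: t).find? (fun kv => kv.2 == (t.map Prod.snd).foldl max v) with
       | some kv => (some kv.1, kv.2)
       | none => ((none : Option Int), (0 : Int))) := by
  induction t generalizing k v with
  | nil => simp
  | cons b t ih =>
    have hle : v ≤ (t.map Prod.snd).foldl max (max v b.2) :=
      le_trans (le_max_left v b.2) (PySem.List.le_foldl_max _ _).1
    by_cases hb : b.2 > v
    · have h1 : fmStep (some k, v) b = (some b.1, b.2) := by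
        simp [fmStep, hb]
      have hmax : max v b.2 = b.2 := max_eq_right (le_of_lt hb)
      have hvne : ¬ (v == (t.map Prod.snd).foldl max b.2) = true := by
        have : v < (t.map Prod.snd).foldl max b.2 :=
          lt_of_lt_of_le hb (PySem.List.le_foldl_max _ _).1
        simp [beq_iff_eq]; omega
      simp only [List.foldl_cons, h1, ih b.1 b.2, List.map_cons, List.foldl_cons, hmax,
        List.find?_cons, hvne]
    · have h1 : fmStep (some k, v) b = (some k, v) := by
        simp [fmStep]; omega
      have hmax : max v b.2 = v := max_eq_left (by omega)
      by_cases hv : (v == (t.map Prod.snd).foldl max v) = true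
      · simp only [List.foldl_cons, h1, ih k v, List.map_cons, List.foldl_cons, hmax,
          List.find?_cons, hv]
      · have hbne : ¬ (b.2 == (t.map Prod.snd).foldl max v) = true := by
          have h2 : v ≤ (t.map Prod.snd).foldl max v := (PySem.List.le_foldl_max _ _).1
          simp only [beq_iff_eq] at hv ⊢
          omega
        simp only [List.foldl_cons, h1, ih k v, List.map_cons, List.foldl_cons, hmax,
          List.find?_cons, hv, hbne]

-- ===== VERDICT (by name: the statement is the Claim_ definition above) =====
theorem find_max_counter_spec : Claim_equal_find_max_counter := by
  intro counter _
  unfold Spec_find_max_counter find_max_counter find_max_counter_alt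
  cases counter with
  | nil => rfl
  | cons a t =>
    have h1 : fmStep (none, 0) a = (some a.1, a.2) := by simp [fmStep]
    simp only [List.foldl_cons, h1, foldl_fmStep_eq, List.map_cons,
      PySem.List.max?_id_cons]
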